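-- pv_equiv track=rewrite | github.com/mmistroni/Codility | test/test_pascal_matrix.py | pascal_matrix_spaced_conditional
-- ===== SOURCE A (Python) =====
-- def pascal_matrix_spaced_conditional(pascal_triangle):
--     """
--     Creates a Pascal's Matrix with zeros inserted between elements,
--     but only for rows with more than one element.
--
--     Args:
--         pascal_triangle: A list of lists representing Pascal's Triangle.
--
--     Returns:
--         A list of lists representing the spaced Pascal's Matrix.
--     """
--
--     if not pascal_triangle:
--         return []
--
--     spaced_matrix = []
--     for row in pascal_triangle:
--         if len(row) > 1:  # Check if the row has more than one element
--             spaced_row = []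
--             for i, num in enumerate(row):
--                 spaced_row.append(num)
--                 if i < len(row) - 1:
--                     spaced_row.append(0)
--             spaced_matrix.append(spaced_row)
--         else:
--             spaced_matrix.append(row)  # Keep rows with one element as they are
--
--     return spaced_matrix
-- ===== SOURCE B (Python) =====
-- def pascal_matrix_spaced_conditional(pascal_triangle):
--     result = []
--     for row in pascal_triangle:
--         if len(row) <= 1:
--             result.append(row)
--         else:
--             out = [0] * (2 * len(row) - 1)
--             out[::2] = row
--             result.append(out)
--     return result
-- ===== Notes on version B (the rewrite author's own statement) =====
-- stated objective: idiomatic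
-- what changed: Replaces the index-tracking inner loop with conditional zero appends by preallocating a [0]*(2n-1) row and dropping the originals onto even indices via strided slice assignment.
import Mathlib
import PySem

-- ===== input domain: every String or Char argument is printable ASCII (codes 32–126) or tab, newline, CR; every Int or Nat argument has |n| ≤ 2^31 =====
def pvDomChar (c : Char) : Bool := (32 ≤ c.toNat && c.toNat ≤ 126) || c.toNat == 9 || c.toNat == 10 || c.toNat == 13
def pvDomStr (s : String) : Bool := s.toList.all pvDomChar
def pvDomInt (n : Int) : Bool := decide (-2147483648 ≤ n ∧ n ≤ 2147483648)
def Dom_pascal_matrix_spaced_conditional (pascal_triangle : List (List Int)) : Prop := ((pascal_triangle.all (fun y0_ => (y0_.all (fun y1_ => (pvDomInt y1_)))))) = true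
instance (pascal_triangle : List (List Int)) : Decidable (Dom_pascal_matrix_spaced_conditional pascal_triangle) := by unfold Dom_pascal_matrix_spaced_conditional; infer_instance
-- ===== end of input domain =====

-- B replaces the index-tracking inner loop of A with a preallocated zero row
-- filled by strided (step-2) slice assignment; same cost, more idiomatic.


-- ===== PORT A =====
-- inner loop: 'for i, num in enumerate(row): spaced_row.append(num); if i < len(row)-1: spaced_row.append(0)'
def pvSpacedRowLoop (n : Nat) : Nat → List Int → List Int → List Int
  | _, acc, [] => acc
  | i, acc, num :: rest =>
      let acc := acc ++ [num]
      let acc := if i < n - 1 then acc ++ [0] else acc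
      pvSpacedRowLoop n (i + 1) acc rest

def pascal_matrix_spaced_conditional (pascal_triangle : List (List Int)) : List (List Int) :=
  if pascal_triangle = [] then []
  else
    pascal_triangle.foldl (fun spaced_matrix row =>
      if row.length > 1 then
        spaced_matrix ++ [pvSpacedRowLoop row.length 0 [] row]
      else
        spaced_matrix ++ [row]) []

-- ===== PORT B =====
-- hand port of 'out[::2] = row' on out = [0]*(2*len(row)-1): exact because
-- the even slots of out are precisely len(row) many, so the assignment
-- writes row's elements at indices 0,2,4,… keeping the odd zeros.
def pvAssignStep2 : List Int → List Int → List Int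
  | zs, [] => zs
  | [], _ :: _ => []
  | [_], r :: rs => r :: pvAssignStep2 [] rs
  | _ :: z1 :: zs, r :: rs => r :: z1 :: pvAssignStep2 zs rs

def pascal_matrix_spaced_conditional_alt (pascal_triangle : List (List Int)) : List (List Int) :=
  pascal_triangle.foldl (fun result row =>
    if row.length ≤ 1 then
      result ++ [row]
    else
      result ++ [pvAssignStep2 (List.replicate (2 * row.length - 1) 0) row]) []

-- ===== PRECONDITION & SPEC =====
def Spec_pascal_matrix_spaced_conditional (pascal_triangle : List (List Int)) (out : List (List Int)) : Prop := out = pascal_matrix_spaced_conditional_alt pascal_triangle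
instance (pascal_triangle : List (List Int)) (out : List (List Int)) : Decidable (Spec_pascal_matrix_spaced_conditional pascal_triangle out) := by unfold Spec_pascal_matrix_spaced_conditional; infer_instance

-- ===== CLAIM (what is proved, stated in full; the proofs are below) =====
def Claim_equal_pascal_matrix_spaced_conditional : Prop := ∀ (pascal_triangle : List (List Int)), Dom_pascal_matrix_spaced_conditional pascal_triangle → Spec_pascal_matrix_spaced_conditional pascal_triangle (pascal_matrix_spaced_conditional pascal_triangle)

-- ===== LEMMAS AND PROOFS =====
-- canonical "zeros interspersed" row both sides compute
def pvInter : List Int → List Int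
  | [] => []
  | [x] => [x]
  | x :: y :: t => x :: 0 :: pvInter (y :: t)

theorem pvSpacedRowLoop_eq (rs : List Int) : ∀ (n i : Nat) (acc : List Int),
    i + rs.length = n → pvSpacedRowLoop n i acc rs = acc ++ pvInter rs := by
  induction rs with
  | nil => intro n i acc _; simp [pvSpacedRowLoop, pvInter]
  | cons num rest ih =>
    intro n i acc h
    cases rest with
    | nil =>
      have hi : ¬ i < n - 1 := by simp at h; omega
      simp [pvSpacedRowLoop, hi, pvInter]
    | cons s t =>
      have hi : i < n - 1 := by simp at h; omega
      have hstep : pvSpacedRowLoop n i acc (num :: s :: t)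
          = pvSpacedRowLoop n (i + 1) (acc ++ [num] ++ [0]) (s :: t) := by
        simp [pvSpacedRowLoop, hi]
      rw [hstep, ih n (i + 1) (acc ++ [num] ++ [0]) (by simp at h ⊢; omega)]
      simp [pvInter]

theorem pvAssignStep2_eq : ∀ (row : List Int), row ≠ [] →
    pvAssignStep2 (List.replicate (2 * row.length - 1) 0) row = pvInter row := by
  intro row
  induction row with
  | nil => intro h; exact absurd rfl h
  | cons r rs ih =>
    intro _
    cases rs with
    | nil => simp [pvAssignStep2, pvInter]
    | cons s t =>
      have hlen : 2 * (r :: s :: t).length - 1 = ((2 * (s :: t).length - 1) + 1) + 1 := by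
        simp; omega
      rw [hlen, List.replicate_succ, List.replicate_succ]
      simp only [pvAssignStep2, pvInter]
      rw [ih (by simp)]

theorem pvRow_eq (row : List Int) (h : row.length > 1) :
    pvSpacedRowLoop row.length 0 [] row = pvAssignStep2 (List.replicate (2 * row.length - 1) 0) row := by
  rw [pvSpacedRowLoop_eq row row.length 0 [] (by omega),
      pvAssignStep2_eq row (by intro hn; simp [hn] at h)]
  rfl

theorem pvFold_eq (rows : List (List Int)) : ∀ acc : List (List Int),
    rows.foldl (fun spaced_matrix row =>
      if row.length > 1 then
        spaced_matrix ++ [pvSpacedRowLoop row.length 0 [] row]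
      else
        spaced_matrix ++ [row]) acc
    = rows.foldl (fun result row =>
      if row.length ≤ 1 then
        result ++ [row]
      else
        result ++ [pvAssignStep2 (List.replicate (2 * row.length - 1) 0) row]) acc := by
  induction rows with
  | nil => intro acc; rfl
  | cons row rest ih =>
    intro acc
    simp only [List.foldl]
    by_cases h : row.length > 1
    · rw [if_pos h, if_neg (by omega), pvRow_eq row h, ih]
    · rw [if_neg h, if_pos (by omega), ih]

-- ===== VERDICT (by name: the statement is the Claim_ definition above) =====
theorem pascal_matrix_spaced_conditional_spec : Claim_equal_pascal_matrix_spaced_conditional := by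
  intro t _
  unfold Spec_pascal_matrix_spaced_conditional pascal_matrix_spaced_conditional pascal_matrix_spaced_conditional_alt
  by_cases h : t = []
  · simp [h]
  · rw [if_neg h]; exact pvFold_eq t []
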